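-- pv_equiv track=rewrite | github.com/alexpovkolas/pn-lab1 | thue_morse.py | get_sequence_item
-- ===== SOURCE A (Python) =====
-- def get_sequence_item(k):
--     result = 0
--
--     for i in range(1, k+1):
--         shift = 1 << (i - 1)
--         mask = (1 << shift) - 1
--         negation = result ^ mask
--         result = (result << shift) ^ negation
--
--     return result
-- ===== SOURCE B (Python) =====
-- def get_sequence_item(k):
--     # Thue-Morse 2^k-bit integer directly from the definition: bit n is the
--     # parity of popcount(n), MSB first.
--     if k <= 0:
--         return 0
--     bits = ''.join('1' if bin(n).count('1') & 1 else '0' for n in range(1 << k))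
--     return int(bits, 2)
-- ===== Notes on version B (the rewrite author's own statement) =====
-- stated objective: idiomatic
-- what changed: B computes each Thue-Morse bit directly as the parity of bin(n).count('1') over n in range(2**k) and assembles the 2^k-bit integer from that bit string, instead of A's k-step complement-and-concatenate block doubling.
import Mathlib
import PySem

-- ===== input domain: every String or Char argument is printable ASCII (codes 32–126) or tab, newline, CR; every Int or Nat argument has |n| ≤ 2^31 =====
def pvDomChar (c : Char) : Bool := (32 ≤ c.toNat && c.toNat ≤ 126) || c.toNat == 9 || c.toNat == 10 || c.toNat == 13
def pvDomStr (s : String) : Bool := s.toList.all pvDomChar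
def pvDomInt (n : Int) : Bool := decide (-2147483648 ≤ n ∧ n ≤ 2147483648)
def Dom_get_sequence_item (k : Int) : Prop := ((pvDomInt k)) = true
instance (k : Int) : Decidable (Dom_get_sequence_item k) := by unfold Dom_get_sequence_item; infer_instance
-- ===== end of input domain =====

-- B computes the same 2^k-bit Thue-Morse integer per-index from popcount parity
-- instead of A's complement-and-concatenate doubling (objective: idiomatic; not faster).

-- ===== PORT A =====
-- result stays a nonnegative Python int throughout, so it is carried as a Nat;
-- (i - 1).toNat is exact since every i drawn from range(1, k+1) satisfies i ≥ 1.
def get_sequence_item (k : Int) : Int :=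
  ((PySem.List.pyRange 1 (k + 1) 1).foldl
    (fun (result : Nat) (i : Int) =>
      let shift : Nat := 1 <<< (i - 1).toNat
      let mask : Nat := (1 <<< shift) - 1
      let negation : Nat := result ^^^ mask
      (result <<< shift) ^^^ negation)
    0 : Nat)

-- ===== PORT B =====
-- bin(n).count('1') ported as the recursive popcount; the joined bit string and
-- int(bits, 2) ported as the bit list and its base-2 fold.
def pvPopcount : Nat → Nat
  | 0 => 0
  | n + 1 => pvPopcount ((n + 1) / 2) + (n + 1) % 2

def get_sequence_item_alt (k : Int) : Int :=
  if k ≤ 0 then 0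
  else
    (((List.range (2 ^ k.toNat)).map (fun n => pvPopcount n % 2)).foldl
      (fun acc b => acc * 2 + b) 0 : Nat)

-- ===== PRECONDITION & SPEC =====
def Spec_get_sequence_item (k : Int) (out : Int) : Prop := out = get_sequence_item_alt k
instance (k : Int) (out : Int) : Decidable (Spec_get_sequence_item k out) := by unfold Spec_get_sequence_item; infer_instance

-- ===== CLAIM (what is proved, stated in full; the proofs are below) =====
def Claim_equal_get_sequence_item : Prop := ∀ (k : Int), Dom_get_sequence_item k → Spec_get_sequence_item k (get_sequence_item k)

-- ===== LEMMAS AND PROOFS =====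

/-- A's loop body as a recursion on the number of completed iterations. -/
def pvArec : Nat → Nat
  | 0 => 0
  | n + 1 => (pvArec n <<< 2 ^ n) ^^^ (pvArec n ^^^ (2 ^ 2 ^ n - 1))

/-- Base-2 value of a bit list, MSB first (B's fold). -/
def pvVal (l : List Nat) (acc : Nat) : Nat := l.foldl (fun a b => a * 2 + b) acc

theorem pvVal_acc (l : List Nat) (acc : Nat) :
    pvVal l acc = acc * 2 ^ l.length + pvVal l 0 := by
  induction l generalizing acc with
  | nil => simp [pvVal]
  | cons b l ih =>
    simp only [pvVal, List.foldl_cons, List.length_cons]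
    rw [show List.foldl (fun a b => a * 2 + b) (acc * 2 + b) l = pvVal l (acc * 2 + b) from rfl,
        show List.foldl (fun a b => a * 2 + b) (0 * 2 + b) l = pvVal l (0 * 2 + b) from rfl,
        ih (acc * 2 + b), ih (0 * 2 + b)]
    ring

theorem pvVal_lt (l : List Nat) (h : ∀ b ∈ l, b ≤ 1) : pvVal l 0 < 2 ^ l.length := by
  induction l with
  | nil => simp [pvVal]
  | cons b l ih =>
    have hb : b ≤ 1 := h b (List.mem_cons_self)
    have ih' := ih (fun x hx => h x (List.mem_cons_of_mem _ hx))
    simp only [pvVal, List.foldl_cons, List.length_cons]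
    rw [show List.foldl (fun a b => a * 2 + b) (0 * 2 + b) l = pvVal l b from by norm_num [pvVal],
        pvVal_acc]
    have : b * 2 ^ l.length ≤ 1 * 2 ^ l.length := Nat.mul_le_mul_right _ hb
    calc b * 2 ^ l.length + pvVal l 0 < b * 2 ^ l.length + 2 ^ l.length := by omega
      _ ≤ 2 ^ (l.length + 1) := by rw [pow_succ]; omega

theorem pvVal_append (l₁ l₂ : List Nat) :
    pvVal (l₁ ++ l₂) 0 = pvVal l₁ 0 * 2 ^ l₂.length + pvVal l₂ 0 := by
  simp only [pvVal, List.foldl_append]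
  rw [show List.foldl (fun a b => a * 2 + b) (List.foldl (fun a b => a * 2 + b) 0 l₁) l₂
        = pvVal l₂ (pvVal l₁ 0) from rfl, pvVal_acc]
  rfl

theorem pvVal_complement (l : List Nat) (h : ∀ b ∈ l, b ≤ 1) :
    pvVal (l.map (fun b => 1 - b)) 0 = 2 ^ l.length - 1 - pvVal l 0 := by
  induction l with
  | nil => simp [pvVal]
  | cons b l ih =>
    have hb : b ≤ 1 := h b (List.mem_cons_self)
    have hlt := pvVal_lt l (fun x hx => h x (List.mem_cons_of_mem _ hx))
    have ih' := ih (fun x hx => h x (List.mem_cons_of_mem _ hx))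
    have h1 : pvVal (b :: l) 0 = b * 2 ^ l.length + pvVal l 0 := by
      have := pvVal_append [b] l; simpa [pvVal] using this
    have h2 : pvVal ((1 - b) :: l.map (fun b => 1 - b)) 0
        = (1 - b) * 2 ^ l.length + pvVal (l.map (fun b => 1 - b)) 0 := by
      have := pvVal_append [1 - b] (l.map (fun b => 1 - b)); simpa [pvVal] using this
    simp only [List.map_cons, List.length_cons]
    rw [h2, ih', h1]
    have hpos : 0 < 2 ^ l.length := Nat.two_pow_pos _
    rw [pow_succ]
    interval_cases b <;> omega

theorem pvPopcount_add_pow (n : Nat) : ∀ m, m < 2 ^ n → pvPopcount (m + 2 ^ n) = pvPopcount m + 1 := by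
  induction n with
  | zero =>
    intro m hm
    interval_cases m
    rw [show (0 + 2 ^ 0 : Nat) = 0 + 1 from rfl, pvPopcount]
    simp [pvPopcount]
  | succ n ih =>
    intro m hm
    have hdiv : (m + 2 ^ (n + 1)) / 2 = m / 2 + 2 ^ n := by
      rw [pow_succ]; omega
    have hmod : (m + 2 ^ (n + 1)) % 2 = m % 2 := by
      rw [pow_succ]; omega
    have hpos : 0 < m + 2 ^ (n + 1) := by positivity
    obtain ⟨j, hj⟩ : ∃ j, m + 2 ^ (n + 1) = j + 1 := ⟨m + 2 ^ (n + 1) - 1, by omega⟩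
    rw [hj, pvPopcount, ← hj, hdiv, hmod, ih (m / 2) (by omega)]
    cases m with
    | zero => rw [show (0 : Nat) / 2 = 0 from rfl]
    | succ m' => rw [pvPopcount]; omega

/-- x XOR (2^s - 1) is the complement below 2^s. -/
theorem pvXorMask (s : Nat) : ∀ x, x < 2 ^ s → x ^^^ (2 ^ s - 1) = 2 ^ s - 1 - x := by
  induction s with
  | zero => intro x hx; interval_cases x; simp
  | succ s ih =>
    intro x hx
    have hx2 : x >>> 1 < 2 ^ s := by
      simp only [Nat.shiftRight_one]; omega
    have hmask : (2 ^ (s + 1) - 1) = Nat.bit true (2 ^ s - 1) := by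
      simp [Nat.bit, pow_succ]
      have : 0 < 2 ^ s := Nat.two_pow_pos _
      omega
    conv_lhs => rw [← Nat.bit_decide_mod_two_eq_one_shiftRight_one x, hmask]
    rw [Nat.xor_bit, ih _ hx2]
    have hbit : ∀ (b : Bool) (y : Nat), Nat.bit b y = 2 * y + (if b then 1 else 0) := by
      intro b y; cases b <;> simp [Nat.bit]
    rw [hbit]
    have hxeq : x = 2 * (x >>> 1) + x % 2 := by
      simp only [Nat.shiftRight_one]; omega
    have h2s : 0 < 2 ^ s := Nat.two_pow_pos _
    rcases Nat.mod_two_eq_zero_or_one x with hm | hm <;>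
      simp [hm, pow_succ] <;> omega

/-- Shifting left by s then XOR with x < 2^s is addition. -/
theorem pvShiftXor (s : Nat) : ∀ a x, x < 2 ^ s → (a <<< s) ^^^ x = a * 2 ^ s + x := by
  induction s with
  | zero => intro a x hx; interval_cases x; simp
  | succ s ih =>
    intro a x hx
    have hx2 : x >>> 1 < 2 ^ s := by
      simp only [Nat.shiftRight_one]; omega
    have hshift : a <<< (s + 1) = Nat.bit false ((a <<< s)) := by
      simp [Nat.bit, Nat.shiftLeft_eq, pow_succ]
      ring
    conv_lhs => rw [hshift, ← Nat.bit_decide_mod_two_eq_one_shiftRight_one x]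
    rw [Nat.xor_bit, ih _ _ hx2]
    have hbit : ∀ (b : Bool) (y : Nat), Nat.bit b y = 2 * y + (if b then 1 else 0) := by
      intro b y; cases b <;> simp [Nat.bit]
    rw [hbit]
    have hxeq : x = 2 * (x >>> 1) + x % 2 := by
      simp only [Nat.shiftRight_one]; omega
    rw [pow_succ]
    rcases Nat.mod_two_eq_zero_or_one x with hm | hm <;> simp [hm] <;> ring_nf <;> omega

/-- B's bit list for 2^n indices. -/
def pvBits (n : Nat) : List Nat := (List.range (2 ^ n)).map (fun m => pvPopcount m % 2)

theorem pvBits_le (n : Nat) : ∀ b ∈ pvBits n, b ≤ 1 := by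
  intro b hb
  simp only [pvBits, List.mem_map] at hb
  obtain ⟨m, _, rfl⟩ := hb
  omega

theorem pvBits_length (n : Nat) : (pvBits n).length = 2 ^ n := by
  simp [pvBits]

theorem pvBits_succ (n : Nat) :
    pvBits (n + 1) = pvBits n ++ (pvBits n).map (fun b => 1 - b) := by
  have hsplit : List.range (2 ^ (n + 1)) =
      List.range (2 ^ n) ++ (List.range (2 ^ n)).map (fun m => 2 ^ n + m) := by
    rw [pow_succ, mul_two, List.range_add]
  simp only [pvBits, hsplit, List.map_append, List.map_map]
  congr 1
  apply List.map_congr_left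
  intro m hm
  simp only [List.mem_range] at hm
  simp only [Function.comp_apply]
  rw [Nat.add_comm (2 ^ n) m, pvPopcount_add_pow n m hm]
  omega

/-- Main invariant: A's doubling recursion equals B's popcount-parity value. -/
theorem pvMain (n : Nat) : pvArec n = pvVal (pvBits n) 0 := by
  induction n with
  | zero => simp [pvArec, pvBits, pvVal, pvPopcount]
  | succ n ih =>
    have hlt : pvVal (pvBits n) 0 < 2 ^ 2 ^ n := by
      have := pvVal_lt (pvBits n) (pvBits_le n)
      rwa [pvBits_length] at this
    rw [pvArec, ih, pvXorMask _ _ hlt,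
        pvShiftXor _ _ _ (by have : 0 < 2 ^ 2 ^ n := Nat.two_pow_pos _; omega),
        pvBits_succ, pvVal_append, pvVal_complement _ (pvBits_le n)]
    simp [pvBits_length, List.length_map]

/-- A's fold over range(1, n+1) is pvArec n. -/
theorem pvAfold (n : Nat) :
    ((PySem.List.pyRange 1 ((n : Int) + 1) 1).foldl
      (fun (result : Nat) (i : Int) =>
        let shift : Nat := 1 <<< (i - 1).toNat
        let mask : Nat := (1 <<< shift) - 1
        let negation : Nat := result ^^^ mask
        (result <<< shift) ^^^ negation)
      0) = pvArec n := by
  induction n with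
  | zero => simp [PySem.List.pyRange_one_eq_nil, pvArec]
  | succ n ih =>
    rw [show ((n + 1 : Nat) : Int) + 1 = ((n : Int) + 1) + 1 by push_cast; ring,
        PySem.List.pyRange_one_succ_right (by omega), List.foldl_append, ih]
    simp only [List.foldl_cons, List.foldl_nil]
    rw [pvArec]
    have h1 : ((n : Int) + 1 - 1).toNat = n := by omega
    simp only [h1, Nat.one_shiftLeft]

-- ===== VERDICT (by name: the statement is the Claim_ definition above) =====
theorem get_sequence_item_spec : Claim_equal_get_sequence_item := by
  intro k _
  unfold Spec_get_sequence_item get_sequence_item get_sequence_item_alt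
  by_cases hk : k ≤ 0
  · rw [PySem.List.pyRange_one_eq_nil (by omega)]
    simp [hk]
  · obtain ⟨n, rfl⟩ : ∃ n : Nat, k = (n : Int) := ⟨k.toNat, by omega⟩
    rw [if_neg hk, pvAfold, pvMain]
    simp [pvVal, pvBits]
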